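-- pv_equiv track=rewrite | github.com/stanfordnlp/chirpycardinal | chirpy/response_generators/neural_chat/util.py | question_part
-- ===== SOURCE A (Python) =====
-- from typing import Optional
--
-- def question_part(response) -> Optional[str]:
--     """Returns the question part of the utterance, if there is one. Otherwise returns None"""
--     if '?' not in response:
--         return None
--     question_idx = response.index('?')
--     response = response[:question_idx].strip()
--     other_punc_indices = [i for i in range(len(response)) if response[i] in ['.', ',', '!']]
--     if not other_punc_indices:
--         return response
--     last_other_punc_index = max(other_punc_indices)
--     response = response[last_other_punc_index+1:].strip()
--     return response
-- ===== SOURCE B (Python) =====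
-- def question_part(response):
--     """Returns the question part of the utterance, if there is one. Otherwise returns None"""
--     current = ""
--     for ch in response:
--         if ch == '?':
--             return current.strip()
--         if ch in '.,!':
--             current = ""
--         else:
--             current += ch
--     return None
-- ===== Notes on version B (the rewrite author's own statement) =====
-- stated objective: simpler
-- what changed: A strips the prefix before '?', builds the full list of punctuation indices with a range comprehension, takes its max and slices; B is a single forward pass over the string whose accumulator resets at each '.', ',' or '!' and is stripped and returned when '?' is reached.
import Mathlib
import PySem

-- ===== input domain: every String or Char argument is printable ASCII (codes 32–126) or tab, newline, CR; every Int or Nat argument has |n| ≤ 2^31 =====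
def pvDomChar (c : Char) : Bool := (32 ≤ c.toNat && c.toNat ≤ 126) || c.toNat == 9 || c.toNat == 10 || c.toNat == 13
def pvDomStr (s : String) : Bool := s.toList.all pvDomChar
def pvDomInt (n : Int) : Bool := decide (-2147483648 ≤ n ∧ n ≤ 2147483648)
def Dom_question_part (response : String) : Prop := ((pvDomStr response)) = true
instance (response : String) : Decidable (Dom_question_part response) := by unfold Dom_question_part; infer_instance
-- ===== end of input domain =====

-- B replaces A's strip + index comprehension + max + slice with a single forward pass whose
-- accumulator resets at each '.', ',', '!' (simpler, one pass); return values proved equal.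

-- ===== PORT A =====
-- the list comprehension [i for i in range(len(response)) if response[i] in ['.', ',', '!']]
def puncIdxs (r : List Char) : List Int :=
  (PySem.List.pyRange 0 (r.length : Int)).filter
    (fun i => decide (PySem.Chars.pyGet? r i ∈ [some '.', some ',', some '!']))

-- the part of A after 'response = response[:question_idx].strip()' (r is that stripped prefix)
def qpTail (r : List Char) : Option String :=
  if puncIdxs r = [] then some (String.ofList r)
  else
    match PySem.List.max? (puncIdxs r) (fun x => x) with
    | none => none   -- unreachable: max? of a nonempty list
    | some m => some (String.ofList (PySem.Chars.strip (PySem.Chars.slice r (some (m + 1)) none)))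

def question_part (response : String) : Option String :=
  if PySem.Chars.isIn ['?'] response.toList = false then none
  else
    qpTail (PySem.Chars.strip (PySem.Chars.slice response.toList none
      (some (PySem.Chars.find response.toList ['?']))))

-- ===== PORT B =====
-- the for-loop of B: cur is the accumulated 'current'
def qpAltGo : List Char → List Char → Option String
  | [], _ => none
  | c :: rest, cur =>
    if c = '?' then some (String.ofList (PySem.Chars.strip cur))
    else if c ∈ ['.', ',', '!'] then qpAltGo rest []
    else qpAltGo rest (cur ++ [c])

def question_part_alt (response : String) : Option String :=
  qpAltGo response.toList []

-- ===== PRECONDITION & SPEC =====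
def Spec_question_part (response : String) (out : Option String) : Prop := out = question_part_alt response
instance (response : String) (out : Option String) : Decidable (Spec_question_part response out) := by unfold Spec_question_part; infer_instance

-- ===== CLAIM (what is proved, stated in full; the proofs are below) =====
def Claim_equal_question_part : Prop := ∀ (response : String), Dom_question_part response → Spec_question_part response (question_part response)

-- ===== LEMMAS AND PROOFS =====

-- punctuation test shared by both programs
def isP (c : Char) : Bool := decide (c ∈ ['.', ',', '!'])

-- the value B's accumulator holds when the '?' is reached
def segAcc : List Char → List Char → List Char
  | cur, [] => cur
  | cur, c :: rest => if isP c then segAcc [] rest else segAcc (cur ++ [c]) rest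

theorem qpAltGo_none (cs : List Char) (h : '?' ∉ cs) (cur : List Char) :
    qpAltGo cs cur = none := by
  induction cs generalizing cur with
  | nil => rfl
  | cons c rest ih =>
    simp only [List.mem_cons, not_or] at h
    simp only [qpAltGo, if_neg (Ne.symm h.1)]
    split <;> exact ih h.2 _

theorem qpAltGo_run (p : List Char) (h : '?' ∉ p) (t cur : List Char) :
    qpAltGo (p ++ '?' :: t) cur = some (String.ofList (PySem.Chars.strip (segAcc cur p))) := by
  induction p generalizing cur with
  | nil => simp [qpAltGo, segAcc]
  | cons c rest ih =>
    simp only [List.mem_cons, not_or] at h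
    simp only [List.cons_append, qpAltGo, if_neg (Ne.symm h.1), segAcc]
    by_cases hc : isP c = true
    · have hc' : c ∈ ['.', ',', '!'] := by simpa [isP] using hc
      rw [if_pos hc', if_pos hc, ih h.2]
    · have hc' : c ∉ ['.', ',', '!'] := by simpa [isP] using hc
      rw [if_neg hc', if_neg hc, ih h.2]

theorem segAcc_no_punct (l : List Char) (h : ∀ x ∈ l, isP x = false) (cur : List Char) :
    segAcc cur l = cur ++ l := by
  induction l generalizing cur with
  | nil => simp [segAcc]
  | cons c rest ih =>
    rw [segAcc, if_neg (by simp [h c (by simp)]), ih (fun x hx => h x (by simp [hx]))]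
    simp

theorem segAcc_last_punct (u v : List Char) (c : Char) (hc : isP c = true)
    (hv : ∀ x ∈ v, isP x = false) (cur : List Char) :
    segAcc cur (u ++ c :: v) = v := by
  induction u generalizing cur with
  | nil => simp [segAcc, hc, segAcc_no_punct v hv]
  | cons a u' ih => simp only [List.cons_append, segAcc]; split <;> exact ih _

-- generic dropWhile facts used for strip
theorem head_dropWhile {α : Type} (p : α → Bool) (l : List α) (d : α) (e : List α)
    (h : List.dropWhile p l = d :: e) : p d = false := by
  induction l with
  | nil => simp at h
  | cons a t ih =>
    rw [List.dropWhile_cons] at h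
    split at h
    · exact ih h
    · next hp => cases h; simpa using hp

-- whitespace/strip facts
theorem lstrip_append_not_ws (u v : List Char) (c : Char) (h : PySem.Chars.isspace c = false) :
    PySem.Chars.lstrip (u ++ c :: v) = PySem.Chars.lstrip u ++ c :: v := by
  simp only [PySem.Chars.lstrip, List.dropWhile_append]
  split
  · next he =>
    simp only [List.isEmpty_iff] at he
    simp [he, h]
  · rfl

theorem rstrip_append_not_ws (u v : List Char) (c : Char) (h : PySem.Chars.isspace c = false) :
    PySem.Chars.rstrip (u ++ c :: v) = u ++ c :: PySem.Chars.rstrip v := by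
  simp only [PySem.Chars.rstrip, List.reverse_append, List.reverse_cons, List.append_assoc,
    List.dropWhile_append]
  split
  · next he =>
    simp only [List.isEmpty_iff] at he
    simp [he, h]
  · next he => simp

theorem lstrip_rstrip_comm (x : List Char) :
    PySem.Chars.lstrip (PySem.Chars.rstrip x) = PySem.Chars.rstrip (PySem.Chars.lstrip x) := by
  rcases hd : List.dropWhile PySem.Chars.isspace x with _ | ⟨d, e⟩
  · have hall : ∀ y ∈ x, PySem.Chars.isspace y = true := List.dropWhile_eq_nil_iff.mp hd
    have hr : PySem.Chars.rstrip x = [] := by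
      simp only [PySem.Chars.rstrip, List.reverse_eq_nil_iff, List.dropWhile_eq_nil_iff]
      exact fun y hy => hall y (List.mem_reverse.mp hy)
    have hl : PySem.Chars.lstrip x = [] := by simp [PySem.Chars.lstrip, hd]
    rw [hr, hl]
    rfl
  · have hdw : PySem.Chars.isspace d = false := head_dropWhile _ _ _ _ hd
    have hx : x = x.takeWhile PySem.Chars.isspace ++ d :: e := by
      conv_lhs => rw [← List.takeWhile_append_dropWhile (p := PySem.Chars.isspace) (l := x)]
      rw [hd]
    have htw : PySem.Chars.lstrip (x.takeWhile PySem.Chars.isspace) = [] := by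
      simp only [PySem.Chars.lstrip, List.dropWhile_eq_nil_iff]
      exact fun y hy => List.mem_takeWhile_imp hy
    have hlx : PySem.Chars.lstrip x = d :: e := by simp [PySem.Chars.lstrip, hd]
    calc PySem.Chars.lstrip (PySem.Chars.rstrip x)
        = PySem.Chars.lstrip (x.takeWhile PySem.Chars.isspace ++ d :: PySem.Chars.rstrip e) := by
          conv_lhs => rw [hx, rstrip_append_not_ws _ _ _ hdw]
      _ = d :: PySem.Chars.rstrip e := by
          rw [lstrip_append_not_ws _ _ _ hdw, htw, List.nil_append]
      _ = PySem.Chars.rstrip (PySem.Chars.lstrip x) := by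
          rw [hlx, show (d :: e : List Char) = [] ++ d :: e from rfl,
            rstrip_append_not_ws _ _ _ hdw, List.nil_append]

theorem lstrip_idem (x : List Char) :
    PySem.Chars.lstrip (PySem.Chars.lstrip x) = PySem.Chars.lstrip x := by
  simp [PySem.Chars.lstrip, List.dropWhile_idempotent]

theorem rstrip_idem (x : List Char) :
    PySem.Chars.rstrip (PySem.Chars.rstrip x) = PySem.Chars.rstrip x := by
  simp [PySem.Chars.rstrip, List.dropWhile_idempotent]

theorem strip_rstrip (v : List Char) :
    PySem.Chars.strip (PySem.Chars.rstrip v) = PySem.Chars.strip v := by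
  simp only [PySem.Chars.strip]
  rw [lstrip_rstrip_comm, rstrip_idem]

theorem strip_idem (x : List Char) :
    PySem.Chars.strip (PySem.Chars.strip x) = PySem.Chars.strip x := by
  simp only [PySem.Chars.strip]
  rw [lstrip_rstrip_comm, lstrip_idem, rstrip_idem]

theorem rstrip_sublist (l : List Char) : (PySem.Chars.rstrip l).Sublist l := by
  simp only [PySem.Chars.rstrip]
  have := (List.dropWhile_sublist (l := l.reverse) PySem.Chars.isspace).reverse
  simpa using this

theorem strip_sublist (l : List Char) : (PySem.Chars.strip l).Sublist l := by
  simp only [PySem.Chars.strip]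
  refine (rstrip_sublist _).trans ?_
  simp only [PySem.Chars.lstrip]
  exact List.dropWhile_sublist _

theorem isP_not_ws {c : Char} (h : isP c = true) : PySem.Chars.isspace c = false := by
  simp only [isP, decide_eq_true_eq, List.mem_cons, List.not_mem_nil, or_false] at h
  rcases h with rfl | rfl | rfl <;> decide

theorem exists_last_punct (l : List Char) (h : ∃ c ∈ l, isP c = true) :
    ∃ u c v, l = u ++ c :: v ∧ isP c = true ∧ ∀ x ∈ v, isP x = false := by
  induction l using List.reverseRecOn with
  | nil => simp at h
  | append_singleton l a ih =>
    by_cases ha : isP a = true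
    · exact ⟨l, a, [], by simp, ha, by simp⟩
    · obtain ⟨c, hc, hcp⟩ := h
      rcases List.mem_append.mp hc with hc | hc
      · obtain ⟨u, c', v, rfl, h1, h2⟩ := ih ⟨c, hc, hcp⟩
        refine ⟨u, c', v ++ [a], by simp, h1, ?_⟩
        intro x hx
        rcases List.mem_append.mp hx with hx | hx
        · exact h2 x hx
        · simp only [List.mem_singleton] at hx; subst hx; simpa using ha
      · simp only [List.mem_singleton] at hc; subst hc; exact absurd hcp ha

-- membership in the comprehension
theorem mem_puncIdxs (r : List Char) (j : Nat) (hj : j < r.length) :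
    ((j : Int) ∈ puncIdxs r) ↔ isP r[j] = true := by
  simp only [puncIdxs, List.mem_filter, PySem.List.mem_pyRange_one,
    PySem.Chars.pyGet?_eq_listPyGet?, PySem.List.pyGet?_natCast]
  simp [hj, isP]

theorem puncIdxs_bounds (r : List Char) (i : Int) (hi : i ∈ puncIdxs r) :
    0 ≤ i ∧ i < r.length :=
  PySem.List.mem_pyRange_one.mp (List.mem_filter.mp hi).1

theorem puncIdxs_eq_nil_iff (r : List Char) :
    puncIdxs r = [] ↔ ∀ c ∈ r, isP c = false := by
  constructor
  · intro h c hc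
    obtain ⟨j, hj, rfl⟩ := List.mem_iff_getElem.mp hc
    by_contra hp
    have : (j : Int) ∈ puncIdxs r := (mem_puncIdxs r j hj).mpr (by simpa using hp)
    simp [h] at this
  · intro h
    rw [List.eq_nil_iff_forall_not_mem]
    intro i hi
    obtain ⟨h0, hlt⟩ := puncIdxs_bounds r i hi
    have hj : i.toNat < r.length := by omega
    have : isP r[i.toNat] = true := by
      rw [← mem_puncIdxs r i.toNat hj]
      simpa [Int.toNat_of_nonneg h0] using hi
    exact absurd this (by simp [h r[i.toNat] (List.getElem_mem _)])

-- A's tail computation equals "strip of the last segment" on a stripped prefix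
theorem qpTail_strip (p : List Char) :
    qpTail (PySem.Chars.strip p)
      = some (String.ofList (PySem.Chars.strip (segAcc [] (PySem.Chars.strip p)))) := by
  by_cases h : puncIdxs (PySem.Chars.strip p) = []
  · rw [qpTail, if_pos h, segAcc_no_punct _ ((puncIdxs_eq_nil_iff _).mp h), List.nil_append,
      strip_idem]
  · rw [qpTail, if_neg h]
    rcases hm : PySem.List.max? (puncIdxs (PySem.Chars.strip p)) (fun x => x) with _ | m
    · exact absurd ((PySem.List.max?_eq_none_iff _ _).mp hm) h
    · set r := PySem.Chars.strip p with hr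
      obtain ⟨h0, hlt⟩ := puncIdxs_bounds r m (PySem.List.max?_mem hm)
      have hjlt : m.toNat < r.length := by omega
      have hmem : isP r[m.toNat] = true := by
        rw [← mem_puncIdxs r m.toNat hjlt]
        simpa [Int.toNat_of_nonneg h0] using PySem.List.max?_mem hm
      have hmax : ∀ j, m.toNat < j → (hj : j < r.length) → isP r[j] = false := by
        intro j hgt hj
        by_contra hp
        have : (j : Int) ∈ puncIdxs r := (mem_puncIdxs r j hj).mpr (by simpa using hp)
        have := PySem.List.max?_isMax hm _ this
        simp only at this
        omega
      have hslice : PySem.Chars.slice r (some (m + 1)) none = r.drop (m.toNat + 1) := by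
        rw [PySem.Chars.slice_eq_listSlice, PySem.List.slice_from r (by omega : (0:Int) ≤ m + 1)]
        congr 1
        omega
      have hdec : r = r.take m.toNat ++ r[m.toNat] :: r.drop (m.toNat + 1) := by
        conv_lhs => rw [← List.take_append_drop m.toNat r, List.drop_eq_getElem_cons hjlt]
      have hv : ∀ x ∈ r.drop (m.toNat + 1), isP x = false := by
        intro x hx
        obtain ⟨j, hj, rfl⟩ := List.mem_iff_getElem.mp hx
        rw [List.getElem_drop]
        exact hmax _ (by omega) (by simp at hj; omega)
      show some (String.ofList (PySem.Chars.strip (PySem.Chars.slice r (some (m + 1)) none)))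
        = some (String.ofList (PySem.Chars.strip (segAcc [] r)))
      rw [hslice]
      congr 2
      conv_rhs => rw [hdec, segAcc_last_punct _ _ _ hmem hv]

-- the bridge: stripping before or after taking the last segment gives the same result
theorem strip_segAcc_strip (p : List Char) :
    PySem.Chars.strip (segAcc [] (PySem.Chars.strip p)) =
      PySem.Chars.strip (segAcc [] p) := by
  by_cases hp : ∃ c ∈ p, isP c = true
  · obtain ⟨u, c, v, rfl, hc, hv⟩ := exists_last_punct p hp
    have hws := isP_not_ws hc
    have hstrip : PySem.Chars.strip (u ++ c :: v)
        = PySem.Chars.lstrip u ++ c :: PySem.Chars.rstrip v := by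
      simp only [PySem.Chars.strip]
      rw [lstrip_append_not_ws _ _ _ hws, rstrip_append_not_ws _ _ _ hws]
    have hrv : ∀ x ∈ PySem.Chars.rstrip v, isP x = false :=
      fun x hx => hv x ((rstrip_sublist v).mem hx)
    rw [hstrip, segAcc_last_punct _ _ _ hc hrv, segAcc_last_punct _ _ _ hc hv, strip_rstrip]
  · push Not at hp
    have hp' : ∀ c ∈ p, isP c = false := fun c hc => by simpa using hp c hc
    have hps : ∀ c ∈ PySem.Chars.strip p, isP c = false :=
      fun c hc => hp' c ((strip_sublist p).mem hc)
    rw [segAcc_no_punct _ hps, segAcc_no_punct _ hp', List.nil_append, List.nil_append,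
      strip_idem]

theorem question_part_eq (response : String) :
    question_part response = question_part_alt response := by
  by_cases hq : '?' ∈ response.toList
  · have hin : PySem.Chars.isIn ['?'] response.toList = true :=
      (PySem.Chars.isIn_iff_infix _ _).mpr ((List.singleton_infix_iff _ _).mpr hq)
    have hfind0 : 0 ≤ PySem.Chars.find response.toList ['?'] :=
      (PySem.Chars.find_nonneg_iff _ _).mpr ((List.singleton_infix_iff _ _).mpr hq)
    obtain ⟨hpre, hmin⟩ := PySem.Chars.find_spec hfind0
    set k := (PySem.Chars.find response.toList ['?']).toNat with hk
    obtain ⟨w, hw⟩ : ∃ w, response.toList.drop k = '?' :: w := by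
      obtain ⟨tail, htail⟩ := hpre
      exact ⟨tail, htail.symm⟩
    have hs : response.toList = response.toList.take k ++ '?' :: w := by
      conv_lhs => rw [← List.take_append_drop k response.toList, hw]
    have hnp : '?' ∉ response.toList.take k := by
      intro hmem
      obtain ⟨i, hi, hgi⟩ := List.mem_iff_getElem.mp hmem
      obtain ⟨hik, hilen⟩ : i < k ∧ i < response.toList.length := by
        rw [List.length_take] at hi
        exact Nat.lt_min.mp hi
      refine hmin i hik ⟨response.toList.drop (i + 1), ?_⟩
      rw [List.drop_eq_getElem_cons hilen]
      have hgi' : response.toList[i] = '?' := by rw [← hgi, List.getElem_take]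
      rw [hgi', List.singleton_append]
    have hfind : PySem.Chars.find response.toList ['?'] = (k : Int) :=
      (Int.toNat_of_nonneg hfind0).symm
    have hslice : PySem.Chars.slice response.toList none
        (some (PySem.Chars.find response.toList ['?'])) = response.toList.take k := by
      rw [hfind, PySem.Chars.slice_eq_listSlice,
        PySem.List.slice_to _ (by omega : (0:Int) ≤ (k:Int))]
      simp
    rw [question_part, if_neg (by simp [hin]), hslice, qpTail_strip, strip_segAcc_strip,
      question_part_alt]
    conv_rhs => rw [hs]
    rw [qpAltGo_run _ hnp]
  · have hin : PySem.Chars.isIn ['?'] response.toList = false :=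
      (PySem.Chars.isIn_eq_false_iff _ _).mpr (fun h => hq ((List.singleton_infix_iff _ _).mp h))
    rw [question_part, if_pos (by simp [hin]), question_part_alt, qpAltGo_none _ hq]

-- ===== VERDICT (by name: the statement is the Claim_ definition above) =====
theorem question_part_spec : Claim_equal_question_part := by
  intro response _
  unfold Spec_question_part
  exact question_part_eq response
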